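-- pv_equiv track=rewrite | github.com/nsauvil/ETSINF-4 | ALT/Práctica2/exactcover.py | esDisjunto
-- ===== SOURCE A (Python) =====
-- def esDisjunto(s):   #comprobar que no hay cadenas repetidas
--     for i in range(0,len(s)):
--         aux = s[i]
--         s2 = s[i+1:]
--         for a in aux:
--             for el in s2:
--                 if a in el:
--                     return False
--     return True
-- ===== SOURCE B (Python) =====
-- def esDisjunto(s):
--     seen = set()
--     for string in s:
--         chars = set(string)
--         if seen & chars:
--             return False
--         seen |= chars
--     return True
-- ===== Notes on version B (the rewrite author's own statement) =====
-- stated objective: simpler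
-- what changed: Replaces A's nested pairwise scan (each string's characters searched in every later string) with a single pass that keeps a running set of characters seen so far and fails on the first non-empty intersection.
import Mathlib
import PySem

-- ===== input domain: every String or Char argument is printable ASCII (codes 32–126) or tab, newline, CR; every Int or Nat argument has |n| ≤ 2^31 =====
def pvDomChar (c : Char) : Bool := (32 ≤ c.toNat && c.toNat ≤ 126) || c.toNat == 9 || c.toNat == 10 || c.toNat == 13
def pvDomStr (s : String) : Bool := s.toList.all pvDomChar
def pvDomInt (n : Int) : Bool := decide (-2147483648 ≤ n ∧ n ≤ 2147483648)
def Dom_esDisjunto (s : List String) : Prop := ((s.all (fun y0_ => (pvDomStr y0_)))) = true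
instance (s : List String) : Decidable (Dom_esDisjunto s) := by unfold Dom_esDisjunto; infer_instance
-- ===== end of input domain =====

-- B replaces A's nested pairwise scan with a single pass over the list keeping a
-- running set of characters seen so far (objective: simpler). A is total; no Pre_.

-- ===== PORT A =====
-- A's loop 'for i in range(len(s)): aux = s[i]; s2 = s[i+1:]' visits head and tail of
-- each suffix in order, so it is the structural recursion below; the early
-- 'return False' over 'for a in aux: for el in s2: if a in el' is the nested any.
-- 'a in el' (a is a 1-char string) is exactly character membership: el.toList.contains a.
def esDisjunto : List String → Bool
  | [] => true
  | aux :: s2 =>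
    if aux.toList.any (fun a => s2.any (fun el => el.toList.contains a)) then false
    else esDisjunto s2

-- ===== PORT B =====
-- Source B's loop body: chars = set(string); if seen & chars: return False; seen |= chars
def esDisjuntoAltGo (seen : PySem.Set Char) : List String → Bool
  | [] => true
  | str :: rest =>
    let chars : PySem.Set Char := PySem.Set.ofList str.toList
    if PySem.Set.inter seen chars = [] then
      esDisjuntoAltGo (PySem.Set.union seen chars) rest
    else false

def esDisjunto_alt (s : List String) : Bool := esDisjuntoAltGo PySem.Set.empty s

-- ===== PRECONDITION & SPEC =====
def Spec_esDisjunto (s : List String) (out : Bool) : Prop := out = esDisjunto_alt s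
instance (s : List String) (out : Bool) : Decidable (Spec_esDisjunto s out) := by unfold Spec_esDisjunto; infer_instance

-- ===== CLAIM (what is proved, stated in full; the proofs are below) =====
def Claim_equal_esDisjunto : Prop := ∀ (s : List String), Dom_esDisjunto s → Spec_esDisjunto s (esDisjunto s)

-- ===== LEMMAS AND PROOFS =====

theorem esDisjunto_iff (l : List String) :
    esDisjunto l = true ↔ l.Pairwise (fun x y => ∀ a ∈ x.toList, a ∉ y.toList) := by
  induction l with
  | nil => simp [esDisjunto]
  | cons aux s2 ih =>
    simp only [esDisjunto, List.pairwise_cons]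
    by_cases h : aux.toList.any (fun a => s2.any (fun el => el.toList.contains a)) = true
    · rw [if_pos h]
      simp only [List.any_eq_true, List.contains_iff_mem] at h
      obtain ⟨a, ha, el, hel, hmem⟩ := h
      constructor
      · intro hfalse; cases hfalse
      · rintro ⟨hdisj, -⟩; exact absurd hmem (hdisj el hel a ha)
    · rw [if_neg h, ih]
      simp only [List.any_eq_true, List.contains_iff_mem, not_exists, not_and] at h
      constructor
      · intro hp; exact ⟨fun y hy a ha => h a ha y hy, hp⟩
      · rintro ⟨-, hp⟩; exact hp

theorem esDisjuntoAltGo_iff (l : List String) (seen : PySem.Set Char) :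
    esDisjuntoAltGo seen l = true ↔
      (∀ x ∈ l, ∀ a ∈ seen, a ∉ x.toList) ∧
        l.Pairwise (fun x y => ∀ a ∈ x.toList, a ∉ y.toList) := by
  induction l generalizing seen with
  | nil => simp [esDisjuntoAltGo]
  | cons x rest ih =>
    simp only [esDisjuntoAltGo, List.pairwise_cons]
    by_cases h : PySem.Set.inter seen (PySem.Set.ofList x.toList) = []
    · have hdisj : ∀ a ∈ seen, a ∉ x.toList := by
        intro a ha hx
        have hmem : a ∈ PySem.Set.inter seen (PySem.Set.ofList x.toList) :=
          (PySem.Set.mem_inter _ _ _).mpr ⟨ha, (PySem.Set.mem_ofList _ _).mpr hx⟩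
        rw [h] at hmem; cases hmem
      rw [if_pos h, ih]
      constructor
      · rintro ⟨hall, hp⟩
        refine ⟨?_, ?_, hp⟩
        · intro y hy a ha
          rcases List.mem_cons.mp hy with rfl | hy'
          · exact hdisj a ha
          · exact hall y hy' a ((PySem.Set.mem_union _ _ _).mpr (Or.inl ha))
        · intro y hy a ha
          exact hall y hy a
            ((PySem.Set.mem_union _ _ _).mpr (Or.inr ((PySem.Set.mem_ofList _ _).mpr ha)))
      · rintro ⟨hall, hx, hp⟩
        refine ⟨?_, hp⟩
        intro y hy a ha
        rcases (PySem.Set.mem_union _ _ _).mp ha with ha' | ha'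
        · exact hall y (List.mem_cons_of_mem _ hy) a ha'
        · exact hx y hy a ((PySem.Set.mem_ofList _ _).mp ha')
    · rw [if_neg h]
      obtain ⟨a, hmem⟩ := List.exists_mem_of_ne_nil _ h
      have ha := (PySem.Set.mem_inter _ _ _).mp hmem
      constructor
      · intro hfalse; cases hfalse
      · rintro ⟨hall, -⟩
        exact absurd ((PySem.Set.mem_ofList _ _).mp ha.2)
          (hall x List.mem_cons_self a ha.1)

-- ===== VERDICT (by name: the statement is the Claim_ definition above) =====
theorem esDisjunto_spec : Claim_equal_esDisjunto := by
  intro s _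
  unfold Spec_esDisjunto esDisjunto_alt
  rw [Bool.eq_iff_iff, esDisjunto_iff, esDisjuntoAltGo_iff]
  simp [PySem.Set.empty]
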